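-- pv_equiv track=rewrite | github.com/dev-akshaygupta/getting-started | concepts/Lists/EquilibriumIndex.py | get_equilibrium_PS
-- ===== SOURCE A (Python) =====
-- def get_equilibrium_PS(arr):
-- 	arr_ln = len(arr)
--
-- 	pref = [0] * arr_ln
-- 	suff = [0] * arr_ln
--
-- 	# Initial the start and end of prefix and suffix array
-- 	pref[0] = arr[0]
-- 	suff[arr_ln - 1] = arr[arr_ln - 1]
--
-- 	# Calculate prefix sum for all indices
-- 	for idx in range(1, arr_ln):
-- 		pref[idx] = pref[idx - 1] + arr[idx]
--
-- 	# Calculate suffix sum for all indices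
-- 	for idx in range(arr_ln - 2, -1, -1):
-- 		suff[idx] = suff[idx + 1] + arr[idx]
--
-- 	# Check if prefix sum equals to suffix sum
-- 	for idx in range(arr_ln):
-- 		if pref[idx] == suff[idx]:
-- 			return arr[idx]
--
-- 	return None
-- ===== SOURCE B (Python) =====
-- def get_equilibrium_PS(arr):
--     total = sum(arr)
--     left = 0
--     for a in arr:
--         if left == total - left - a:
--             return a
--         left += a
--     return None
-- ===== Notes on version B (the rewrite author's own statement) =====
-- stated objective: simpler
-- what changed: Replaces the prefix array, suffix array and final scan (three loops plus two allocated lists) by a single forward pass keeping a running left sum and deriving the right sum from the precomputed total.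
import Mathlib
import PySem

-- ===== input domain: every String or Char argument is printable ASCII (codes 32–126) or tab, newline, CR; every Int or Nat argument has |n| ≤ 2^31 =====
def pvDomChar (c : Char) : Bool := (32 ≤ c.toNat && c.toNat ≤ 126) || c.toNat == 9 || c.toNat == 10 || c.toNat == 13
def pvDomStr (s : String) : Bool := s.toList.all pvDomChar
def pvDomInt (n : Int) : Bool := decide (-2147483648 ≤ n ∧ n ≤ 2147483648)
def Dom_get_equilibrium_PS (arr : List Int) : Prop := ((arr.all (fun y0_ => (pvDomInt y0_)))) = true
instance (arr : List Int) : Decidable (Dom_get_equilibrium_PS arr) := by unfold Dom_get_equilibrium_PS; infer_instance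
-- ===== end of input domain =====

-- B replaces A's prefix array, suffix array and final scan by a single running-sum pass
-- (objective: simpler, O(1) extra space). Equality of the RETURN value is proved for
-- non-empty lists; on [] Python A raises IndexError (excluded by Pre_) and B returns None.

-- ===== PORT A =====
-- All list indices written by the Python loops are provably in range here, so Python's
-- `pref[idx] = v` / `pref[idx]` are ported exactly by `List.set idx v` / `List.getD idx 0`
-- (Nat indices: every index produced by the ranges is ≥ 0).

-- `for idx in range(arr_ln): if pref[idx] == suff[idx]: return arr[idx]` / `return None`
def pvFindLoop (arr pref suff : List Int) : List Nat → Option Int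
  | [] => none
  | idx :: rest =>
    if pref.getD idx 0 = suff.getD idx 0 then some (arr.getD idx 0)
    else pvFindLoop arr pref suff rest

def get_equilibrium_PS (arr : List Int) : Option Int :=
  let n := arr.length
  if n = 0 then none  -- Python raises IndexError at arr[0]; excluded by Pre_
  else
    -- pref[0] = arr[0]; suff[arr_ln - 1] = arr[arr_ln - 1]
    let pref0 := (List.replicate n (0:Int)).set 0 (arr.getD 0 0)
    let suff0 := (List.replicate n (0:Int)).set (n-1) (arr.getD (n-1) 0)
    -- for idx in range(1, arr_ln): pref[idx] = pref[idx - 1] + arr[idx]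
    let pref := (List.range' 1 (n-1)).foldl
      (fun p idx => p.set idx (p.getD (idx-1) 0 + arr.getD idx 0)) pref0
    -- for idx in range(arr_ln - 2, -1, -1): suff[idx] = suff[idx + 1] + arr[idx]
    let suff := ((List.range (n-1)).reverse).foldl
      (fun s idx => s.set idx (s.getD (idx+1) 0 + arr.getD idx 0)) suff0
    pvFindLoop arr pref suff (List.range n)

-- ===== PORT B =====
-- `left = 0; for a in arr: if left == total - left - a: return a; left += a; return None`
def pvAltGo (total left : Int) : List Int → Option Int
  | [] => none
  | a :: rest => if left = total - left - a then some a else pvAltGo total (left + a) rest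

def get_equilibrium_PS_alt (arr : List Int) : Option Int :=
  pvAltGo arr.sum 0 arr

-- ===== PRECONDITION & SPEC =====
-- Pre_ excludes exactly the empty list, on which Python A raises IndexError (arr[0]).
def Pre_get_equilibrium_PS (arr : List Int) : Prop := arr ≠ []
instance (arr : List Int) : Decidable (Pre_get_equilibrium_PS arr) := by unfold Pre_get_equilibrium_PS; infer_instance
def pvWitness_get_equilibrium_PS : List Int := [1, 2, 3, 2, 1]

def Spec_get_equilibrium_PS (arr : List Int) (out : Option Int) : Prop := out = get_equilibrium_PS_alt arr
instance (arr : List Int) (out : Option Int) : Decidable (Spec_get_equilibrium_PS arr out) := by unfold Spec_get_equilibrium_PS; infer_instance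

-- ===== CLAIM (what is proved, stated in full; the proofs are below) =====
def Claim_equal_get_equilibrium_PS : Prop := ∀ (arr : List Int), Dom_get_equilibrium_PS arr → Pre_get_equilibrium_PS arr → Spec_get_equilibrium_PS arr (get_equilibrium_PS arr)

-- ===== LEMMAS AND PROOFS =====

theorem pv_sum_take_succ (arr : List Int) (i : Nat) (h : i < arr.length) :
    (arr.take (i+1)).sum = (arr.take i).sum + arr.getD i 0 := by
  rw [List.sum_take_succ arr i h, List.getD_eq_getElem?_getD, List.getElem?_eq_getElem h]
  rfl

theorem pv_sum_drop_succ (arr : List Int) (i : Nat) (h : i < arr.length) :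
    (arr.drop i).sum = arr.getD i 0 + (arr.drop (i+1)).sum := by
  rw [List.drop_eq_getElem_cons h, List.sum_cons,
    List.getD_eq_getElem?_getD, List.getElem?_eq_getElem h]
  rfl

-- the prefix-sum loop invariant
theorem pv_pref_inv (arr : List Int) :
    ∀ (m s : Nat) (p : List Int), p.length = arr.length → 1 ≤ s → s + m ≤ arr.length →
    (∀ i, i < s → p.getD i 0 = (arr.take (i+1)).sum) →
    (((List.range' s m).foldl
        (fun p idx => p.set idx (p.getD (idx-1) 0 + arr.getD idx 0)) p).length = arr.length ∧
      ∀ i, i < s + m → ((List.range' s m).foldl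
        (fun p idx => p.set idx (p.getD (idx-1) 0 + arr.getD idx 0)) p).getD i 0
          = (arr.take (i+1)).sum) := by
  intro m
  induction m with
  | zero => intro s p hlen _ _ hinv; simpa using ⟨hlen, fun i hi => hinv i (by omega)⟩
  | succ m ih =>
    intro s p hlen hs hle hinv
    have hsn : s < arr.length := by omega
    rw [List.range'_succ, List.foldl_cons]
    have hres := ih (s+1) (p.set s (p.getD (s-1) 0 + arr.getD s 0))
      (by simpa using hlen) (by omega) (by omega) ?_
    · exact ⟨hres.1, fun i hi => hres.2 i (by omega)⟩
    · intro i hi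
      rw [List.getD_eq_getElem?_getD, List.getElem?_set]
      by_cases hcase : s = i
      · subst hcase
        rw [if_pos rfl, if_pos (by omega)]
        have h1 : p.getD (s-1) 0 = (arr.take s).sum := by
          have := hinv (s-1) (by omega)
          rwa [show s - 1 + 1 = s by omega] at this
        rw [Option.getD_some, h1, pv_sum_take_succ arr s hsn]
      · rw [if_neg hcase, ← List.getD_eq_getElem?_getD]
        exact hinv i (by omega)

-- the suffix-sum loop invariant (the loop runs over indices m-1, …, 0)
theorem pv_suff_inv (arr : List Int) :
    ∀ (m : Nat) (p : List Int), p.length = arr.length → m + 1 ≤ arr.length →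
    (∀ i, m ≤ i → i < arr.length → p.getD i 0 = (arr.drop i).sum) →
    ∀ i, i < arr.length → (((List.range m).reverse).foldl
        (fun s idx => s.set idx (s.getD (idx+1) 0 + arr.getD idx 0)) p).getD i 0
          = (arr.drop i).sum := by
  intro m
  induction m with
  | zero => intro p hlen _ hinv i hi; simpa using hinv i (by omega) hi
  | succ m ih =>
    intro p hlen hle hinv i hi
    have hrev : (List.range (m+1)).reverse = m :: (List.range m).reverse := by
      rw [List.range_succ, List.reverse_append]; rfl
    rw [hrev, List.foldl_cons]
    refine ih (p.set m (p.getD (m+1) 0 + arr.getD m 0)) (by simpa using hlen) (by omega) ?_ i hi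
    intro j hj hjn
    rw [List.getD_eq_getElem?_getD, List.getElem?_set]
    by_cases hcase : m = j
    · subst hcase
      rw [if_pos rfl, if_pos (by omega)]
      have h1 : p.getD (m+1) 0 = (arr.drop (m+1)).sum := hinv (m+1) (by omega) (by omega)
      rw [Option.getD_some, h1, pv_sum_drop_succ arr m (by omega)]
      exact add_comm _ _
    · rw [if_neg hcase, ← List.getD_eq_getElem?_getD]
      exact hinv j (by omega) hjn

theorem pv_take_add_drop (arr : List Int) (k : Nat) :
    (arr.take k).sum + (arr.drop k).sum = arr.sum := by
  rw [← List.sum_append, List.take_append_drop]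

-- the final scan of A equals B's single pass, given the characterizations
theorem pv_bridge (arr pref suff : List Int)
    (hp : ∀ i, i < arr.length → pref.getD i 0 = (arr.take (i+1)).sum)
    (hs : ∀ i, i < arr.length → suff.getD i 0 = (arr.drop i).sum) :
    ∀ (d k : Nat), k + d = arr.length →
      pvFindLoop arr pref suff (List.range' k d) =
        pvAltGo arr.sum ((arr.take k).sum) (arr.drop k) := by
  intro d
  induction d with
  | zero =>
    intro k hk
    rw [show k = arr.length from by omega, List.drop_length]
    rfl
  | succ d ih =>
    intro k hk
    have hkn : k < arr.length := by omega
    rw [List.range'_succ, List.drop_eq_getElem_cons hkn]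
    have ha : arr[k] = arr.getD k 0 := by
      rw [List.getD_eq_getElem?_getD, List.getElem?_eq_getElem hkn]; rfl
    have hcond : (pref.getD k 0 = suff.getD k 0) ↔
        ((arr.take k).sum = arr.sum - (arr.take k).sum - arr[k]) := by
      rw [hp k hkn, hs k hkn, pv_sum_take_succ arr k hkn, ← ha,
        ← pv_take_add_drop arr k, pv_sum_drop_succ arr k hkn, ← ha]
      constructor <;> intro h <;> omega
    show pvFindLoop arr pref suff (k :: List.range' (k+1) d) = _
    rw [pvFindLoop, pvAltGo]
    by_cases h : pref.getD k 0 = suff.getD k 0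
    · rw [if_pos h, if_pos (hcond.mp h), ha]
    · rw [if_neg h, if_neg (fun hc => h (hcond.mpr hc)),
        ih (k+1) (by omega)]
      congr 1
      rw [pv_sum_take_succ arr k hkn, ha]

-- ===== VERDICT (by name: the statement is the Claim_ definition above) =====
theorem get_equilibrium_PS_spec : Claim_equal_get_equilibrium_PS := by
  intro arr _ hpre
  unfold Spec_get_equilibrium_PS get_equilibrium_PS get_equilibrium_PS_alt
  have hn : arr.length ≠ 0 := fun h => hpre (List.eq_nil_of_length_eq_zero h)
  simp only [if_neg hn]
  have h0 : (0:Nat) < arr.length := by omega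
  have hlast : arr.length - 1 < arr.length := by omega
  -- characterize pref
  have hpref := pv_pref_inv arr (arr.length - 1) 1
    ((List.replicate arr.length (0:Int)).set 0 (arr.getD 0 0))
    (by simp) (by omega) (by omega) ?hp0
  case hp0 =>
    intro i hi
    have : i = 0 := by omega
    subst this
    rw [List.getD_eq_getElem?_getD, List.getElem?_set, if_pos rfl,
      if_pos (by simpa using h0)]
    have : arr.take 1 = [arr[0]] := by
      rw [List.take_add_one]
      simp [List.getElem?_eq_getElem h0]
    rw [this]
    simp [List.getD_eq_getElem?_getD, List.getElem?_eq_getElem h0]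
  -- characterize suff
  have hsuff := pv_suff_inv arr (arr.length - 1)
    ((List.replicate arr.length (0:Int)).set (arr.length - 1) (arr.getD (arr.length-1) 0))
    (by simp) (by omega) ?hs0
  case hs0 =>
    intro i hi hin
    have : i = arr.length - 1 := by omega
    subst this
    rw [List.getD_eq_getElem?_getD, List.getElem?_set, if_pos rfl,
      if_pos (by simpa using hlast)]
    have hdrop : (arr.drop (arr.length - 1)).sum = arr.getD (arr.length - 1) 0
        + (arr.drop (arr.length - 1 + 1)).sum := pv_sum_drop_succ arr _ hlast
    rw [hdrop, show arr.length - 1 + 1 = arr.length from by omega, List.drop_length]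
    simp
  -- combine via the bridge at k = 0
  have hfinal := pv_bridge arr _ _
    (fun i hi => hpref.2 i (by omega)) hsuff arr.length 0 (by omega)
  simp only [List.take_zero, List.sum_nil, List.drop_zero] at hfinal
  rw [← List.range_eq_range'] at hfinal
  exact hfinal
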